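-- pv_equiv track=rewrite | github.com/leeajy/portfolio | whale shark/lambda-functions/ws-word-count-update/lambda_function.py | drop_common_words
-- ===== SOURCE A (Python) =====
-- def drop_common_words(counter):
-- 	blacklist = ['','and','i', None, 'to','do','the','a','so','u','a','on','is','you',
-- 				'be','in','that', 'for', 'it', 'like', 'of', 'this', 'me', 'my', 'but',
-- 				'was', 'have', 'with', 'not', 'be', 'he', 'no', 'lol', 'what', 'how',
-- 				'are', 'if', 'yeah', 'wait', 'at', 'some', 'can', 'know', 'too', 'or',
-- 				'about', 'we', 'its', 'your', 'out', 'they', 'she', 'im', 'her', 'tho',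
-- 				'thats']
-- 	for key in blacklist:
-- 		counter.pop(key,'-1')
-- 	return counter
-- ===== SOURCE B (Python) =====
-- STOPWORDS = set(("and i to do the a so u on is you be in that for it like of this me my "
--                  "but was have with not he no lol what how are if yeah wait at some can "
--                  "know too or about we its your out they she im her tho thats").split())
--
-- def drop_common_words(counter):
--     # Rebuilds a fresh dict (return value identical; does not mutate the argument like A does).
--     return {k: v for k, v in counter.items() if k and k not in STOPWORDS}
-- ===== Notes on version B (the rewrite author's own statement) =====
-- stated objective: idiomatic
-- what changed: B builds a fresh dict in one comprehension over the counter, keeping truthy keys not in a stopword set derived from a single split string, instead of A's loop over a blacklist list calling counter.pop on the dict for every blacklist word; B does not mutate its argument (return value is the same).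
import Mathlib
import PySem

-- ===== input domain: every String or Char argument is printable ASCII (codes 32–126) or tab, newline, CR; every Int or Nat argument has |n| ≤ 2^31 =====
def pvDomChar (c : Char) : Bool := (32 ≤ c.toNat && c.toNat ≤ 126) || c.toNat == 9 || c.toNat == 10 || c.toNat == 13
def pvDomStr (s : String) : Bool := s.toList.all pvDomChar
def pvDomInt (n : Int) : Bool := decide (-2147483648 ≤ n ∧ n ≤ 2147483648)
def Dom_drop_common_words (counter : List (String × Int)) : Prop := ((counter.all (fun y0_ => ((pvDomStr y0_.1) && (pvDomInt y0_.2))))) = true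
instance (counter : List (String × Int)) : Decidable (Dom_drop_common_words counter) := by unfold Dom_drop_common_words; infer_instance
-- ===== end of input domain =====

-- B rebuilds a fresh dict by one comprehension over the counter, dropping falsy/stopword keys
-- (stopwords from one split string), instead of A's per-blacklist-word pop loop; idiomatic
-- rewrite, return value identical (A mutates its argument in place, B does not).

-- ===== PORT A =====
-- A's blacklist, in A's order (the Python list also contains None, which can never equal a
-- string key, so its pop is a no-op and it is omitted from this String list).
def pvBlacklistA : List String :=
  ["", "and", "i", "to", "do", "the", "a", "so", "u", "a", "on", "is", "you", "be", "in",
   "that", "for", "it", "like", "of", "this", "me", "my", "but", "was", "have", "with",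
   "not", "be", "he", "no", "lol", "what", "how", "are", "if", "yeah", "wait", "at",
   "some", "can", "know", "too", "or", "about", "we", "its", "your", "out", "they",
   "she", "im", "her", "tho", "thats"]

-- counter.pop(key, default): remove the first (on a dict: only) pair with that key; hand
-- port, exact on association lists encoding dicts.
def pvPopKey (c : List (String × Int)) (k : String) : List (String × Int) :=
  match c with
  | [] => []
  | p :: rest => if p.1 == k then rest else p :: pvPopKey rest k

def drop_common_words (counter : List (String × Int)) : List (String × Int) :=
  pvBlacklistA.foldl pvPopKey counter

-- ===== PORT B =====
-- B's module-level STOPWORDS = set("… words …".split()).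
def pvStopwords : PySem.Set String :=
  PySem.Set.ofList (PySem.Str.split₀
    ("and i to do the a so u on is you be in that for it like of this me my " ++
     "but was have with not he no lol what how are if yeah wait at some can " ++
     "know too or about we its your out they she im her tho thats"))

-- {k: v for k, v in counter.items() if k and k not in STOPWORDS}: with unique keys the
-- comprehension's dict is the kept pairs in order.
def drop_common_words_alt (counter : List (String × Int)) : List (String × Int) :=
  counter.filter (fun p => p.1 ≠ "" && !(PySem.Set.contains pvStopwords p.1))

-- ===== PRECONDITION & SPEC =====
-- Pre_ excludes association lists with duplicate keys: they encode no Python dict (A's input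
-- is a dict, whose keys are unique), and on them A's pop-once vs B's keep-none differ.
def Pre_drop_common_words (counter : List (String × Int)) : Prop :=
  (counter.map Prod.fst).Nodup
instance (counter : List (String × Int)) : Decidable (Pre_drop_common_words counter) := by
  unfold Pre_drop_common_words; infer_instance

def pvWitness_drop_common_words : (List (String × Int)) :=
  [("whale", 3), ("the", 7), ("shark", 1), ("", 2)]

def Spec_drop_common_words (counter : List (String × Int)) (out : List (String × Int)) : Prop := out = drop_common_words_alt counter
instance (counter : List (String × Int)) (out : List (String × Int)) : Decidable (Spec_drop_common_words counter out) := by unfold Spec_drop_common_words; infer_instance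

-- ===== CLAIM (what is proved, stated in full; the proofs are below) =====
def Claim_equal_drop_common_words : Prop := ∀ (counter : List (String × Int)), Dom_drop_common_words counter → Pre_drop_common_words counter → Spec_drop_common_words counter (drop_common_words counter)

-- ===== LEMMAS AND PROOFS =====

-- On a list with no duplicate keys, popping a key once is filtering that key out.
theorem pvPopKey_eq_filter (c : List (String × Int)) (k : String)
    (h : (c.map Prod.fst).Nodup) :
    pvPopKey c k = c.filter (fun p => !(p.1 == k)) := by
  induction c with
  | nil => rfl
  | cons p rest ih =>
    simp only [List.map_cons, List.nodup_cons] at h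
    by_cases hk : p.1 == k
    · have hpk : p.1 = k := by simpa using hk
      have hrest : rest.filter (fun p => !(p.1 == k)) = rest := by
        apply List.filter_eq_self.mpr
        intro q hq
        have hne : q.1 ≠ p.1 := fun e => h.1 (e ▸ List.mem_map_of_mem hq)
        simp [hpk ▸ hne]
      simp [pvPopKey, hk, hrest]
    · simp only [pvPopKey, hk, List.filter_cons]
      simp only [Bool.not_eq_true] at hk
      simp [ih h.2]

theorem pvPopKey_keys_sublist (c : List (String × Int)) (k : String) :
    ((pvPopKey c k).map Prod.fst).Sublist (c.map Prod.fst) := by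
  induction c with
  | nil => simp [pvPopKey]
  | cons p rest ih =>
    by_cases hk : p.1 == k
    · simp [pvPopKey, hk]
    · simpa [pvPopKey, hk] using ih.cons₂ p.1

theorem pvFoldl_pop_eq_filter (bl : List String) (c : List (String × Int))
    (h : (c.map Prod.fst).Nodup) :
    bl.foldl pvPopKey c = c.filter (fun p => !(bl.contains p.1)) := by
  induction bl generalizing c with
  | nil => simp
  | cons k bl ih =>
    have h' : ((pvPopKey c k).map Prod.fst).Nodup := (pvPopKey_keys_sublist c k).nodup h
    rw [List.foldl_cons, ih _ h', pvPopKey_eq_filter c k h, List.filter_filter]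
    apply List.filter_congr
    intro p _
    by_cases hpk : p.1 = k <;> simp [hpk]

-- The split of B's stopword string, evaluated once.
set_option maxRecDepth 4000 in
theorem pvStopwords_eval : pvStopwords = ["and", "i", "to", "do", "the", "a", "so", "u", "on", "is", "you", "be", "in", "that", "for", "it", "like", "of", "this", "me", "my", "but", "was", "have", "with", "not", "he", "no", "lol", "what", "how", "are", "if", "yeah", "wait", "at", "some", "can", "know", "too", "or", "about", "we", "its", "your", "out", "they", "she", "im", "her", "tho", "thats"] := by decide

-- Not being in A's blacklist is being a non-empty non-stopword.
theorem pvBlacklist_cond_eq (s : String) :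
    (!(pvBlacklistA.contains s)) = (s ≠ "" && !(PySem.Set.contains pvStopwords s)) := by
  rw [pvStopwords_eval]
  by_cases he : s = ""
  · subst he; decide
  · have h1 : ∀ t ∈ pvBlacklistA, t = "" ∨ t ∈ ["and", "i", "to", "do", "the", "a", "so", "u", "on", "is", "you", "be", "in", "that", "for", "it", "like", "of", "this", "me", "my", "but", "was", "have", "with", "not", "he", "no", "lol", "what", "how", "are", "if", "yeah", "wait", "at", "some", "can", "know", "too", "or", "about", "we", "its", "your", "out", "they", "she", "im", "her", "tho", "thats"] := by decide
    have h2 : ∀ t ∈ ["and", "i", "to", "do", "the", "a", "so", "u", "on", "is", "you", "be", "in", "that", "for", "it", "like", "of", "this", "me", "my", "but", "was", "have", "with", "not", "he", "no", "lol", "what", "how", "are", "if", "yeah", "wait", "at", "some", "can", "know", "too", "or", "about", "we", "its", "your", "out", "they", "she", "im", "her", "tho", "thats"], t ∈ pvBlacklistA := by decide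
    have hmem : pvBlacklistA.contains s
        = PySem.Set.contains ["and", "i", "to", "do", "the", "a", "so", "u", "on", "is", "you", "be", "in", "that", "for", "it", "like", "of", "this", "me", "my", "but", "was", "have", "with", "not", "he", "no", "lol", "what", "how", "are", "if", "yeah", "wait", "at", "some", "can", "know", "too", "or", "about", "we", "its", "your", "out", "they", "she", "im", "her", "tho", "thats"] s := by
      simp only [PySem.Set.contains]
      rw [Bool.eq_iff_iff, List.contains_iff_mem, List.contains_iff_mem]
      exact ⟨fun h => (h1 s h).resolve_left he, fun h => h2 s h⟩
    rw [hmem]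
    simp only [ne_eq, he, not_false_eq_true, decide_true, Bool.true_and]

-- ===== VERDICT (by name: the statement is the Claim_ definition above) =====
theorem drop_common_words_spec : Claim_equal_drop_common_words := by
  intro counter _ hpre
  unfold Spec_drop_common_words drop_common_words drop_common_words_alt
  rw [pvFoldl_pop_eq_filter _ _ hpre]
  exact List.filter_congr (fun p _ => pvBlacklist_cond_eq p.1)
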